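-- pv_equiv track=rewrite | github.com/daniel-reich/ubiquitous-fiesta | ZQhRtfh9CB8aSwvrc_18.py | greater_than_sum
-- ===== SOURCE A (Python) =====
-- def greater_than_sum(nums):
--   sum1=0
--   sum2=0
--   for i in range(1,len(nums)):
--       if nums[i]>sum(nums[:i]):
--         sum1+=1
--       else:
--         sum2+=1
--   return len(nums)-1==sum1
-- ===== SOURCE B (Python) =====
-- def greater_than_sum(nums):
--     if not nums:
--         return False
--     s = nums[0]
--     for x in nums[1:]:
--         if x <= s:
--             return False
--         s += x
--     return True
-- ===== Notes on version B (the rewrite author's own statement) =====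
-- stated objective: faster
-- what changed: Replaces the quadratic loop that re-sums nums[:i] and counts successes with a single pass maintaining a running prefix sum and exiting early on the first failing element.
import Mathlib
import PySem

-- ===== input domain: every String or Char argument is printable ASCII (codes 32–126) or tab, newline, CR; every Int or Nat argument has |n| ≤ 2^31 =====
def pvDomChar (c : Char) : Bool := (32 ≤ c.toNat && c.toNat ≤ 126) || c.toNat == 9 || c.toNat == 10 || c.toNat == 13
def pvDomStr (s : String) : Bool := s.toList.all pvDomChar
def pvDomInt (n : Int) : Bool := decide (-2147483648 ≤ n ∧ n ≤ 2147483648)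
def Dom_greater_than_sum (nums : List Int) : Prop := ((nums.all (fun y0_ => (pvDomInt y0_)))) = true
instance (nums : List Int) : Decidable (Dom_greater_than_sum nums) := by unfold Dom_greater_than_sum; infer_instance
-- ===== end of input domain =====

-- B replaces A's quadratic re-summing of nums[:i] (with success/failure counters) by one
-- early-exit pass maintaining a running prefix sum; a timing run measures the speed-up.

-- ===== PORT A =====
def greater_than_sum (nums : List Int) : Bool :=
  -- sum1=0; sum2=0; for i in range(1,len(nums)): if nums[i]>sum(nums[:i]): sum1+=1 else sum2+=1
  decide ((nums.length : Int) - 1 =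
    ((PySem.List.pyRange 1 (nums.length : Int) 1).foldl
      (fun (p : Int × Int) i =>
        if PySem.List.pyGetD nums i 0 > (PySem.List.slice nums none (some i)).sum
        then (p.1 + 1, p.2) else (p.1, p.2 + 1)) (0, 0)).1)

-- ===== PORT B =====
def gtsGo (s : Int) : List Int → Bool
  | [] => true
  | x :: t => if x ≤ s then false else gtsGo (s + x) t

def greater_than_sum_alt (nums : List Int) : Bool :=
  match nums with
  | [] => false
  | x :: rest => gtsGo x rest

-- ===== PRECONDITION & SPEC =====
def Spec_greater_than_sum (nums : List Int) (out : Bool) : Prop := out = greater_than_sum_alt nums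
instance (nums : List Int) (out : Bool) : Decidable (Spec_greater_than_sum nums out) := by unfold Spec_greater_than_sum; infer_instance

-- ===== CLAIM (what is proved, stated in full; the proofs are below) =====
def Claim_equal_greater_than_sum : Prop := ∀ (nums : List Int), Dom_greater_than_sum nums → Spec_greater_than_sum nums (greater_than_sum nums)

-- ===== LEMMAS AND PROOFS =====

-- A's fold only ever adds 1 to one component: its first component counts the successes.
theorem foldA_fst (nums : List Int) (l : List Int) (a b : Int) :
    ((l.foldl (fun (p : Int × Int) i =>
        if PySem.List.pyGetD nums i 0 > (PySem.List.slice nums none (some i)).sum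
        then (p.1 + 1, p.2) else (p.1, p.2 + 1)) (a, b)).1)
      = a + (l.countP (fun i =>
          decide (PySem.List.pyGetD nums i 0 > (PySem.List.slice nums none (some i)).sum)) : Int) := by
  induction l generalizing a b with
  | nil => simp
  | cons y t ih =>
      by_cases h : PySem.List.pyGetD nums y 0 > (PySem.List.slice nums none (some y)).sum <;>
        simp [List.foldl_cons, h, ih, List.countP_cons] <;> try ring

-- B's loop returns true iff every element beats s plus the sum of the elements before it.
theorem gtsGo_iff (l : List Int) (s : Int) :
    gtsGo s l = true ↔ ∀ k (h : k < l.length), s + (l.take k).sum < l[k] := by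
  induction l generalizing s with
  | nil => simp [gtsGo]
  | cons x t ih =>
      simp only [gtsGo]
      by_cases h : x ≤ s
      · rw [if_pos h]
        constructor
        · intro hc; exact absurd hc (by simp)
        · intro hall
          have := hall 0 (by simp)
          simp at this; omega
      · rw [if_neg h, ih]
        constructor
        · intro hall k hk
          cases k with
          | zero => simpa using (by omega : s < x)
          | succ j =>
              have := hall j (by simpa using Nat.succ_lt_succ_iff.mp hk)
              simp [List.take_succ_cons, List.sum_cons] at this ⊢
              omega
        · intro hall k hk
          have := hall (k + 1) (by simpa using Nat.succ_lt_succ_iff.mpr hk)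
          simp [List.take_succ_cons, List.sum_cons] at this ⊢
          omega

-- ===== VERDICT (by name: the statement is the Claim_ definition above) =====
theorem greater_than_sum_spec : Claim_equal_greater_than_sum := by
  intro nums _
  show greater_than_sum nums = greater_than_sum_alt nums
  cases nums with
  | nil => rfl
  | cons x rest =>
      unfold greater_than_sum greater_than_sum_alt
      rw [foldA_fst]
      have hlen : ((PySem.List.pyRange 1 ((x :: rest).length : Int) 1).length) = rest.length := by
        rw [PySem.List.length_pyRange_one]; simp
      have hiff : (∀ i ∈ PySem.List.pyRange 1 ((x :: rest).length : Int) 1,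
            decide (PySem.List.pyGetD (x :: rest) i 0 > (PySem.List.slice (x :: rest) none (some i)).sum) = true)
          ↔ (∀ k (h : k < rest.length), x + (rest.take k).sum < rest[k]) := by
        constructor
        · intro hall k hk
          have hmem : ((k : Int) + 1) ∈ PySem.List.pyRange 1 ((x :: rest).length : Int) 1 := by
            rw [PySem.List.mem_pyRange_one]; simp; omega
          have hthis := hall _ hmem
          simp only [decide_eq_true_eq] at hthis
          have hcast : ((k : Int) + 1) = ((k + 1 : Nat) : Int) := by push_cast; ring
          rw [hcast, PySem.List.pyGetD_natCast, PySem.List.slice_to_natCast] at hthis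
          simp only [List.getD, List.take_succ_cons, List.sum_cons, List.getElem?_cons_succ,
            List.getElem?_eq_getElem hk, Option.getD_some] at hthis
          omega
        · intro hall i hmem
          rw [PySem.List.mem_pyRange_one] at hmem
          obtain ⟨h1, h2⟩ := hmem
          have hklt : (i - 1).toNat < rest.length := by simp at h2; omega
          have hthis := hall (i - 1).toNat hklt
          have hik : i = (((i - 1).toNat + 1 : Nat) : Int) := by omega
          rw [hik, PySem.List.pyGetD_natCast, PySem.List.slice_to_natCast]
          simp only [decide_eq_true_eq, List.getD, List.take_succ_cons, List.sum_cons,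
            List.getElem?_cons_succ, List.getElem?_eq_getElem hklt, Option.getD_some]
          omega
      have hcount : (((x :: rest).length : Int) - 1
            = 0 + ((PySem.List.pyRange 1 ((x :: rest).length : Int) 1).countP (fun i =>
                decide (PySem.List.pyGetD (x :: rest) i 0 > (PySem.List.slice (x :: rest) none (some i)).sum)) : Int))
          ↔ (∀ k (h : k < rest.length), x + (rest.take k).sum < rest[k]) := by
        rw [← hiff, ← List.countP_eq_length]
        have hle := List.countP_le_length (l := PySem.List.pyRange 1 ((x :: rest).length : Int) 1)
          (p := fun i => decide (PySem.List.pyGetD (x :: rest) i 0 > (PySem.List.slice (x :: rest) none (some i)).sum))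
        rw [hlen] at hle ⊢
        simp only [List.length_cons]
        constructor
        · intro h; omega
        · intro h; rw [h]; push_cast; ring
      rw [decide_eq_decide.mpr hcount]
      show decide (∀ k (h : k < rest.length), x + (rest.take k).sum < rest[k]) = gtsGo x rest
      rw [show (gtsGo x rest) = decide (gtsGo x rest = true) by simp]
      exact (decide_eq_decide.mpr (gtsGo_iff rest x)).symm
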